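-- pv_equiv track=rewrite | github.com/reed-foster/foobar | guards/combinatorial_optimization_bruteforce.py | infloop
-- ===== SOURCE A (Python) =====
-- def infloop(a, b):
--     #determines if guards with a and b bananas will enter an infinite loop
--
--     #optimizations
--     if (a == b):
--         return False
--     if (a + b) % 2 == 1:
--         return True
--     if (a + b) & (a + b - 1) == 0:
--         return False
--
--     #all other cases:
--     mem = []
--     while (a != b):
--         if (a > b):
--             a, b = b, a
--         if (a, b) in mem: #guards have entered infinite loop
--             return True
--         else:
--             mem.append((a, b))
--             b -= a
--             a += a
--     return False
-- ===== SOURCE B (Python) =====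
-- def infloop(a, b):
--     # determines if guards with a and b bananas will enter an infinite loop
--     if a == b:
--         return False
--     if a == 0 or b == 0:
--         return True  # stuck state: nothing is ever transferred, so the pair repeats forever
--     # the pair (a, b) equalises iff (a+b)/gcd(a,b) is a power of two,
--     # i.e. iff the odd part of a+b divides a
--     s = a + b
--     while s % 2 == 0:
--         s //= 2
--     return a % s != 0
-- ===== Notes on version B (the rewrite author's own statement) =====
-- stated objective: faster
-- what changed: B replaces A's state-by-state simulation with a memory list of seen pairs by the closed-form criterion: the process loops iff the odd part of a+b does not divide a (equivalently (a+b)/gcd(a,b) is not a power of two), computed by repeated halving of a+b; intended as faster (O(log(a+b)) vs simulation of up to ~(a+b)/2 states) — a timing run read 6x-32x at mid sizes and 9448x at the largest size, but the largest rung is unconfirmed because A itself times out on most inputs there.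
-- intended difference: On pairs where one guard has 0 bananas and the other a positive even power of two (e.g. (0,2)), A's power-of-two shortcut returns False, but the state (0,2^k) repeats forever, so the guards do loop; B returns True, the intended answer. — e.g. on infloop(0, 2): A returns false, B returns true
-- outside the precondition, e.g. on infloop(-1, 2): A returns True, B returns False
import Mathlib
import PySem

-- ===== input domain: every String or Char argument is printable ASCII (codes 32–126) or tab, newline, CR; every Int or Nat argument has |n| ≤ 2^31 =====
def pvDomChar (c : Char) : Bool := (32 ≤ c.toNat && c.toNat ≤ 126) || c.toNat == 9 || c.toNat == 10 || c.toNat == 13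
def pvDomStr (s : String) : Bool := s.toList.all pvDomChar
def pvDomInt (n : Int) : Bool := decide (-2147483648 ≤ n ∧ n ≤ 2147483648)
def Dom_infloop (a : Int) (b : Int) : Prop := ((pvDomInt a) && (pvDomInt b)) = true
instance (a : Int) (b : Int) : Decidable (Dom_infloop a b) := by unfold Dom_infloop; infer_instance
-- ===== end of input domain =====

-- B replaces A's pair-by-pair simulation with memory of seen states by the closed-form
-- criterion "the process loops iff the odd part of a+b does not divide a"; intended as faster
-- (measured 6x-32x at mid sizes in a timing run; its largest rung is unconfirmed, A times out there).

-- ===== PORT A =====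
-- A's while-loop as fuel recursion; the fuel (a+b).toNat + 2 is proved sufficient on Pre_.
def infloopGo (fuel : Nat) (a b : Int) (mem : List (Int × Int)) : Bool :=
  match fuel with
  | 0 => false
  | f + 1 =>
    if a = b then false
    else
      let p := if a > b then (b, a) else (a, b)
      if p ∈ mem then true
      else infloopGo f (p.1 + p.1) (p.2 - p.1) (mem ++ [p])

def infloop (a : Int) (b : Int) : Bool :=
  if a = b then false
  else if PySem.Int.mod (a + b) 2 = 1 then true
  else if PySem.Int.band (a + b) (a + b - 1) = 0 then false
  else infloopGo ((a + b).toNat + 2) a b []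

-- ===== PORT B =====
-- Source B's `while s % 2 == 0: s //= 2` as fuel recursion; (a+b).toNat + 1 halvings always suffice.
def oddPartGo (fuel : Nat) (s : Int) : Int :=
  match fuel with
  | 0 => s
  | f + 1 => if PySem.Int.mod s 2 = 0 then oddPartGo f (PySem.Int.floordiv s 2) else s

def infloop_alt (a : Int) (b : Int) : Bool :=
  if a = b then false
  else if a = 0 ∨ b = 0 then true
  else decide (PySem.Int.mod a (oddPartGo ((a + b).toNat + 1) (a + b)) ≠ 0)

-- ===== PRECONDITION & SPEC =====
-- Pre_ restricts to the natural domain of nonnegative banana counts: on negative inputs with an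
-- even sum that is not a power of two A's while loop never returns, and A's values on the
-- remaining negative inputs are accidental by-products of its shortcut tests.
def Pre_infloop (a : Int) (b : Int) : Prop := 0 ≤ a ∧ 0 ≤ b
instance (a : Int) (b : Int) : Decidable (Pre_infloop a b) := by unfold Pre_infloop; infer_instance
def pvWitness_infloop : Int × Int := (6, 2)

-- On inputs where one guard has 0 bananas and the other 2^k (k ≥ 1), A's power-of-two shortcut
-- returns False although the state (0, 2^k) repeats forever, so the guards do loop; B returns
-- True, the intended answer.
def D_infloop (a : Int) (b : Int) : Prop :=
  (a = 0 ∨ b = 0) ∧ ∃ k ∈ Finset.Icc 1 32, a + b = (2 : Int) ^ k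
instance (a : Int) (b : Int) : Decidable (D_infloop a b) := by unfold D_infloop; infer_instance

def Spec_infloop (a : Int) (b : Int) (out : Bool) : Prop := ¬ D_infloop a b → out = infloop_alt a b
instance (a : Int) (b : Int) (out : Bool) : Decidable (Spec_infloop a b out) := by
  unfold Spec_infloop; infer_instance

def pvDiffWitness_infloop : Int × Int := (0, 2)
def pvDiffWitnessOut_infloop : Bool × Bool := (false, true)

-- ===== CLAIM (what is proved, stated in full; the proofs are below) =====
def Claim_unchanged_infloop : Prop :=
  ∀ (a : Int) (b : Int), Dom_infloop a b → Pre_infloop a b → Spec_infloop a b (infloop a b)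
def Claim_changed_infloop : Prop :=
  Dom_infloop (pvDiffWitness_infloop.1) (pvDiffWitness_infloop.2) ∧
  Pre_infloop (pvDiffWitness_infloop.1) (pvDiffWitness_infloop.2) ∧
  D_infloop (pvDiffWitness_infloop.1) (pvDiffWitness_infloop.2) ∧
  infloop (pvDiffWitness_infloop.1) (pvDiffWitness_infloop.2) = pvDiffWitnessOut_infloop.1 ∧
  infloop_alt (pvDiffWitness_infloop.1) (pvDiffWitness_infloop.2) = pvDiffWitnessOut_infloop.2 ∧
  pvDiffWitnessOut_infloop.1 ≠ pvDiffWitnessOut_infloop.2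
def Claim_exact_infloop : Prop :=
  ∀ (a : Int) (b : Int), Dom_infloop a b → Pre_infloop a b → D_infloop a b →
    infloop a b ≠ infloop_alt a b

-- ===== LEMMAS AND PROOFS =====

-- ---- the abstract one-step map of A's process on the smaller pile, sum s fixed ----
def stepN (s x : Nat) : Nat := min (2 * x) (s - 2 * x)

def pairI (s x : Nat) : Int × Int := ((x : Int), (s : Int) - (x : Int))

lemma pairI_inj (s u v : Nat) (h : pairI s u = pairI s v) : u = v := by
  have := congrArg Prod.fst h
  simpa [pairI] using this

lemma orbit_bound (s x : Nat) (hx : 2 * x ≤ s) : ∀ t, 2 * (stepN s)^[t] x ≤ s := by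
  intro t
  induction t with
  | zero => simpa using hx
  | succ t ih =>
    rw [Function.iterate_succ_apply']
    simp only [stepN]
    omega

lemma orbit_eq (s x : Nat) (hs : 0 < s) (hx : 2 * x ≤ s) (t : Nat) :
    (stepN s)^[t] x = min (2 ^ t * x % s) (s - 2 ^ t * x % s) := by
  induction t with
  | zero =>
    have hxs : x < s := by omega
    simp [Nat.mod_eq_of_lt hxs]
    omega
  | succ t ih =>
    rw [Function.iterate_succ_apply', ih]
    have hys : 2 ^ t * x % s < s := Nat.mod_lt _ hs
    have hstep : 2 ^ (t + 1) * x % s = (2 * (2 ^ t * x % s)) % s := by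
      rw [pow_succ, show 2 ^ t * 2 * x = 2 * (2 ^ t * x) by ring]
      conv_lhs => rw [Nat.mul_mod]
      conv_rhs => rw [Nat.mul_mod, Nat.mod_mod_of_dvd _ dvd_rfl]
    rw [hstep]
    set y := 2 ^ t * x % s with hy
    rcases Nat.lt_or_ge (2 * y) s with hlt | hge
    · have hmin : min y (s - y) = y := by omega
      rw [hmin, Nat.mod_eq_of_lt hlt]
      rfl
    · rcases Nat.eq_or_lt_of_le hge with heq | hgt
      · have hmin : min y (s - y) = y := by omega
        rw [hmin, ← heq, Nat.mod_self]
        simp only [stepN]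
        omega
      · have hmin : min y (s - y) = s - y := by omega
        have hmod : (2 * y) % s = 2 * y - s := by
          rw [Nat.mod_eq_sub_mod (by omega), Nat.mod_eq_of_lt (by omega)]
        rw [hmin, hmod]
        simp only [stepN]
        omega

lemma two_mul_min_eq (s y : Nat) (hy : y < s) : (2 * min y (s - y) = s) ↔ 2 * y = s := by
  omega

lemma orbit_hits_iff (s x : Nat) (hs : 0 < s) (hx : 2 * x ≤ s) :
    (∃ t, 2 * (stepN s)^[t] x = s) ↔ (∃ t, 2 * (2 ^ t * x % s) = s) := by
  constructor
  · rintro ⟨t, ht⟩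
    refine ⟨t, ?_⟩
    rw [orbit_eq s x hs hx t] at ht
    exact (two_mul_min_eq s _ (Nat.mod_lt _ hs)).mp ht
  · rintro ⟨t, ht⟩
    refine ⟨t, ?_⟩
    rw [orbit_eq s x hs hx t]
    exact (two_mul_min_eq s _ (Nat.mod_lt _ hs)).mpr ht

-- ---- number theory: hitting s/2 under doubling iff the odd part of s divides x ----
lemma coprime_two_of_odd (d : Nat) (h : d % 2 = 1) : Nat.Coprime d 2 := by
  have h2 : ¬ (2 ∣ d) := by omega
  rcases (Nat.dvd_prime Nat.prime_two).mp (Nat.gcd_dvd_right d 2) with h1 | h1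
  · exact h1
  · exact absurd (h1 ▸ Nat.gcd_dvd_left d 2) h2

lemma reach_iff (s x m d : Nat) (hd : d % 2 = 1) (hsd : s = 2 ^ m * d)
    (hx0 : 0 < x) (hxs : 2 * x ≤ s) :
    (∃ t, 2 * (2 ^ t * x % s) = s) ↔ d ∣ x := by
  have hs : 0 < s := by omega
  have hxlt : x < s := by omega
  constructor
  · rintro ⟨t, ht⟩
    have hm : m ≠ 0 := by
      rintro rfl
      rw [pow_zero, one_mul] at hsd
      omega
    obtain ⟨m', rfl⟩ : ∃ m', m = m' + 1 := ⟨m - 1, by omega⟩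
    have hs2 : s = 2 * (2 ^ m' * d) := by rw [hsd, pow_succ]; ring
    have hr : 2 ^ t * x % s = 2 ^ m' * d := by omega
    have hdvd : d ∣ 2 ^ t * x := by
      have h1 : 2 ^ t * x = s * (2 ^ t * x / s) + 2 ^ t * x % s := (Nat.div_add_mod _ _).symm
      rw [hr] at h1
      have h2 : d ∣ s := ⟨2 ^ (m' + 1), by rw [hsd]; ring⟩
      rw [h1]
      exact dvd_add (h2.mul_right _) (Dvd.intro_left _ rfl)
    exact ((coprime_two_of_odd d hd).pow_right t).dvd_of_dvd_mul_left hdvd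
  · intro hdx
    have hm : m ≠ 0 := by
      rintro rfl
      rw [pow_zero, one_mul] at hsd
      subst hsd
      exact absurd (Nat.le_of_dvd hx0 hdx) (by omega)
    obtain ⟨m', rfl⟩ : ∃ m', m = m' + 1 := ⟨m - 1, by omega⟩
    obtain ⟨x', rfl⟩ := hdx
    have hx'0 : x' ≠ 0 := by rintro rfl; simp at hx0
    obtain ⟨j, u, hu, hx'eq⟩ := Nat.exists_eq_two_pow_mul_odd hx'0
    have hj : j ≤ m' := by
      by_contra hj
      rw [not_le] at hj
      obtain ⟨c, hc⟩ := pow_dvd_pow 2 (by omega : m' + 1 ≤ j)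
      have hdvd2 : 2 ^ (m' + 1) * d ∣ d * x' := ⟨c * u, by rw [hx'eq, hc]; ring⟩
      have hle := Nat.le_of_dvd (by omega) hdvd2
      rw [← hsd] at hle
      omega
    refine ⟨m' - j, ?_⟩
    obtain ⟨w, hw⟩ : ∃ w, u = 2 * w + 1 := ⟨u / 2, by rcases hu with ⟨w, hww⟩; omega⟩
    have hpow : 2 ^ (m' - j) * 2 ^ j = 2 ^ m' := by rw [← pow_add]; congr 1; omega
    have key : 2 ^ (m' - j) * (d * x') = s * w + 2 ^ m' * d := by
      rw [hx'eq, hsd, hw]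
      calc 2 ^ (m' - j) * (d * (2 ^ j * (2 * w + 1)))
          = (2 ^ (m' - j) * 2 ^ j) * d * (2 * w + 1) := by ring
        _ = 2 ^ m' * d * (2 * w + 1) := by rw [hpow]
        _ = 2 ^ (m' + 1) * d * w + 2 ^ m' * d := by rw [pow_succ]; ring
    have hs2 : s = 2 * (2 ^ m' * d) := by rw [hsd, pow_succ]; ring
    have hlt : 2 ^ m' * d < s := by
      have hP : 0 < 2 ^ m' * d := Nat.mul_pos (Nat.two_pow_pos m') (by omega)
      omega
    rw [key, Nat.mul_add_mod, Nat.mod_eq_of_lt hlt]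
    omega

-- ---- the states before the first hit of s/2 are pairwise distinct ----
lemma orbit_inj (s x n : Nat) (hn : 2 * (stepN s)^[n] x = s)
    (hmin : ∀ i < n, 2 * (stepN s)^[i] x ≠ s) :
    ∀ i j, i < j → j ≤ n → (stepN s)^[i] x ≠ (stepN s)^[j] x := by
  intro i j hij hjn heq
  have hper : (stepN s)^[(n - j) + i] x = (stepN s)^[(n - j) + j] x := by
    rw [Function.iterate_add_apply, Function.iterate_add_apply, heq]
  rw [show (n - j) + j = n by omega] at hper
  exact hmin ((n - j) + i) (by omega) (by rw [hper]; exact hn)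

-- ---- pigeonhole: an injective Nat-valued sequence bounded by B has index bound B ----
lemma inj_le (g : Nat → Nat) (n B : Nat) (hbd : ∀ i, i ≤ n → g i ≤ B)
    (hinj : ∀ i j, i < j → j ≤ n → g i ≠ g j) : n ≤ B := by
  have hcard := Fintype.card_le_of_injective
      (fun i : Fin (n + 1) => (⟨g i, by have := hbd i (by omega); omega⟩ : Fin (B + 1))) ?_
  · simpa using hcard
  · intro i j hij
    simp only [Fin.mk.injEq] at hij
    by_contra hne
    have hne' : (i : Nat) ≠ (j : Nat) := fun h => hne (Fin.ext h)
    rcases Nat.lt_or_ge (i : Nat) (j : Nat) with h | h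
    · exact hinj i j h (by omega) hij
    · exact hinj j i (by omega) (by omega) hij.symm

-- ---- facts about a state (a, b) of the loop ----
lemma state_min (s : Nat) (a b : Int) (ha : 0 ≤ a) (hb : 0 ≤ b) (hsum : a + b = (s : Int)) :
    ((min a b).toNat : Int) = min a b ∧ 2 * (min a b).toNat ≤ s := by
  have h1 : (0 : Int) ≤ min a b := le_min ha hb
  have h2 : ((min a b).toNat : Int) = min a b := Int.toNat_of_nonneg h1
  refine ⟨h2, ?_⟩
  have h3 : min a b ≤ a := min_le_left a b
  have h4 : min a b ≤ b := min_le_right a b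
  omega

lemma swap_eq (s : Nat) (a b : Int) (ha : 0 ≤ a) (hb : 0 ≤ b) (hsum : a + b = (s : Int)) :
    (if a > b then (b, a) else (a, b)) = pairI s (min a b).toNat := by
  unfold pairI
  split_ifs with h
  · rw [min_eq_right (le_of_lt h)]
    simp only [Prod.mk.injEq]
    constructor <;> omega
  · rw [min_eq_left (by omega : a ≤ b)]
    simp only [Prod.mk.injEq]
    constructor <;> omega

-- ---- the loop returns False when the orbit hits s/2 (first at step n) ----
lemma go_false (s : Nat) : ∀ (fuel n : Nat) (a b : Int) (mem : List (Int × Int)) (x : Nat),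
    0 ≤ a → 0 ≤ b → a + b = (s : Int) → (min a b).toNat = x → n < fuel →
    2 * (stepN s)^[n] x = s →
    (∀ i < n, 2 * (stepN s)^[i] x ≠ s) →
    (∀ i, i ≤ n → pairI s ((stepN s)^[i] x) ∉ mem) →
    infloopGo fuel a b mem = false := by
  intro fuel
  induction fuel with
  | zero => intro n a b mem x _ _ _ _ hn; omega
  | succ f ih =>
    intro n a b mem x ha hb hsum hx hn hhit hmin hmem
    obtain ⟨hcast, h2x⟩ := state_min s a b ha hb hsum
    rw [hx] at hcast h2x
    by_cases hab : a = b
    · simp [infloopGo, hab]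
    · -- n cannot be 0: a ≠ b means 2 * x ≠ s
      have hx0ne : 2 * x ≠ s := by
        intro h
        apply hab
        have h3 : min a b ≤ a := min_le_left a b
        have h4 : min a b ≤ b := min_le_right a b
        omega
      obtain ⟨n', rfl⟩ : ∃ n', n = n' + 1 := by
        cases n with
        | zero => exact absurd hhit (by simpa using hx0ne)
        | succ n' => exact ⟨n', rfl⟩
      have hswap := swap_eq s a b ha hb hsum
      rw [hx] at hswap
      have hp0 : pairI s x ∉ mem := by simpa using hmem 0 (by omega)
      simp only [infloopGo, if_neg hab, hswap, if_neg hp0]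
      -- the new state
      have hsub : ((s : Int) - (x : Int)) - (x : Int) = ((s - 2 * x : Nat) : Int) := by
        push_cast [Nat.cast_sub h2x]
        ring
      have hx' : (min ((pairI s x).1 + (pairI s x).1) ((pairI s x).2 - (pairI s x).1)).toNat
          = stepN s x := by
        unfold pairI
        simp only []
        rw [show (x : Int) + (x : Int) = ((2 * x : Nat) : Int) by push_cast; ring, hsub,
          ← Nat.cast_min, Int.toNat_natCast]
        rfl
      apply ih n' _ _ _ (stepN s x)
      · unfold pairI
        simp only []
        omega
      · unfold pairI
        simp only []
        omega
      · unfold pairI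
        simp only []
        ring
      · exact hx'
      · omega
      · rw [← Function.iterate_succ_apply]; exact hhit
      · intro i hi
        rw [← Function.iterate_succ_apply]
        exact hmin (i + 1) (by omega)
      · intro i hi
        rw [← Function.iterate_succ_apply]
        rw [List.mem_append]
        rw [not_or]
        constructor
        · exact hmem (i + 1) (by omega)
        · intro hmem1
          simp only [List.mem_singleton] at hmem1
          have heq := pairI_inj s _ _ hmem1
          exact orbit_inj s x (n' + 1) hhit hmin 0 (i + 1) (by omega) (by omega)
            (by simp only [Function.iterate_zero, id_eq]; exact heq.symm)

-- ---- the loop returns True when the orbit never hits s/2 ----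
lemma go_true (s : Nat) : ∀ (fuel : Nat) (a b : Int) (mem : List (Int × Int)) (x : Nat),
    0 ≤ a → 0 ≤ b → a + b = (s : Int) → (min a b).toNat = x →
    (∀ t, 2 * (stepN s)^[t] x ≠ s) →
    (∀ q ∈ mem, ∃ u : Nat, 2 * u ≤ s ∧ q = pairI s u) →
    mem.Nodup →
    s / 2 + 2 ≤ mem.length + fuel →
    infloopGo fuel a b mem = true := by
  intro fuel
  induction fuel with
  | zero =>
    intro a b mem x _ _ _ _ _ hq hnd hlen
    exfalso
    have hmap : (mem.map (fun q => q.1.toNat)).Nodup := by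
      refine List.Nodup.map_on ?_ hnd
      intro q hqm r hrm hfe
      obtain ⟨u, _, rfl⟩ := hq q hqm
      obtain ⟨v, _, rfl⟩ := hq r hrm
      have : u = v := by simpa [pairI] using hfe
      rw [this]
    have hsub : (mem.map (fun q => q.1.toNat)).toFinset ⊆ Finset.range (s / 2 + 1) := by
      intro y hy
      rw [List.mem_toFinset, List.mem_map] at hy
      obtain ⟨q, hqm, rfl⟩ := hy
      obtain ⟨u, hu, rfl⟩ := hq q hqm
      simp only [pairI, Int.toNat_natCast, Finset.mem_range]
      omega
    have hcard := Finset.card_le_card hsub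
    rw [List.toFinset_card_of_nodup hmap, Finset.card_range, List.length_map] at hcard
    omega
  | succ f ih =>
    intro a b mem x ha hb hsum hx hnever hq hnd hlen
    obtain ⟨hcast, h2x⟩ := state_min s a b ha hb hsum
    rw [hx] at hcast h2x
    have hab : a ≠ b := by
      intro h
      apply hnever 0
      have h3 : min a b ≤ a := min_le_left a b
      have h4 : min a b ≤ b := min_le_right a b
      simp only [Function.iterate_zero, id_eq]
      omega
    have hswap := swap_eq s a b ha hb hsum
    rw [hx] at hswap
    by_cases hpmem : pairI s x ∈ mem
    · simp only [infloopGo, if_neg hab, hswap, if_pos hpmem]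
    · simp only [infloopGo, if_neg hab, hswap, if_neg hpmem]
      have hsub : ((s : Int) - (x : Int)) - (x : Int) = ((s - 2 * x : Nat) : Int) := by
        push_cast [Nat.cast_sub h2x]
        ring
      have hx' : (min ((pairI s x).1 + (pairI s x).1) ((pairI s x).2 - (pairI s x).1)).toNat
          = stepN s x := by
        unfold pairI
        simp only []
        rw [show (x : Int) + (x : Int) = ((2 * x : Nat) : Int) by push_cast; ring, hsub,
          ← Nat.cast_min, Int.toNat_natCast]
        rfl
      apply ih _ _ _ (stepN s x)
      · unfold pairI
        simp only []
        omega
      · unfold pairI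
        simp only []
        omega
      · unfold pairI
        simp only []
        ring
      · exact hx'
      · intro t
        rw [← Function.iterate_succ_apply]
        exact hnever (t + 1)
      · intro q hqm
        rw [List.mem_append] at hqm
        rcases hqm with h | h
        · exact hq q h
        · simp only [List.mem_singleton] at h
          exact ⟨x, h2x, h⟩
      · rw [List.nodup_append]
        refine ⟨hnd, List.nodup_singleton _, ?_⟩
        intro p hp q hqs
        simp only [List.mem_singleton] at hqs
        subst hqs
        intro h
        exact hpmem (h ▸ hp)
      · rw [List.length_append, List.length_singleton]
        omega

-- ---- the loop computes "the orbit never hits s/2" ----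
lemma go_main (s : Nat) (a b : Int) (ha : 0 < a) (hb : 0 < b) (hsum : a + b = (s : Int)) :
    (infloopGo (s + 2) a b [] = false) ↔
      (∃ t, 2 * (2 ^ t * (min a b).toNat % s) = s) := by
  have hs : 0 < s := by omega
  obtain ⟨hcast, h2x⟩ := state_min s a b (le_of_lt ha) (le_of_lt hb) hsum
  set x := (min a b).toNat with hxdef
  by_cases hE : ∃ t, 2 * (2 ^ t * x % s) = s
  · have hE' : ∃ t, 2 * (stepN s)^[t] x = s := (orbit_hits_iff s x hs h2x).mpr hE
    have hhit := Nat.find_spec hE'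
    have hmin : ∀ i < Nat.find hE', 2 * (stepN s)^[i] x ≠ s := fun i hi => Nat.find_min hE' hi
    have hbound : Nat.find hE' ≤ s / 2 := by
      refine inj_le (fun i => (stepN s)^[i] x) (Nat.find hE') (s / 2) ?_ ?_
      · intro i _
        show (stepN s)^[i] x ≤ s / 2
        have := orbit_bound s x h2x i
        omega
      · exact orbit_inj s x (Nat.find hE') hhit hmin
    have hF := go_false s (s + 2) (Nat.find hE') a b [] x (le_of_lt ha) (le_of_lt hb) hsum
      hxdef.symm (by omega) hhit hmin (by intro i _; simp)
    simp [hF, hE]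
  · have hT := go_true s (s + 2) a b [] x (le_of_lt ha) (le_of_lt hb) hsum hxdef.symm
      (by
        intro t h
        exact hE ((orbit_hits_iff s x hs h2x).mp ⟨t, h⟩))
      (by intro q hq; simp at hq) List.nodup_nil
      (by simp only [List.length_nil]; omega)
    simp [hT, hE]

-- ---- the value of B outside its shortcut branches ----
lemma oddPartGo_spec : ∀ (fuel : Nat) (s : Int), 0 < s → s.toNat ≤ fuel →
    ∃ (j d : Nat), d % 2 = 1 ∧ s.toNat = 2 ^ j * d ∧ oddPartGo fuel s = (d : Int) := by
  intro fuel
  induction fuel with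
  | zero => intro s hs hf; omega
  | succ f ih =>
    intro s hs hf
    have hu : s = ((s.toNat : Nat) : Int) := by omega
    by_cases hmod : PySem.Int.mod s 2 = 0
    · have heven : s.toNat % 2 = 0 := by
        rw [hu, show (2 : Int) = ((2 : Nat) : Int) by norm_num, PySem.Int.mod_natCast] at hmod
        exact_mod_cast hmod
      have hdiv : PySem.Int.floordiv s 2 = ((s.toNat / 2 : Nat) : Int) := by
        conv_lhs => rw [hu, show (2 : Int) = ((2 : Nat) : Int) by norm_num]
        rw [PySem.Int.floordiv_natCast]
      obtain ⟨j, d, hd, hfact, hval⟩ := ih (PySem.Int.floordiv s 2)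
        (by rw [hdiv]; exact_mod_cast Nat.div_pos (by omega) (by omega))
        (by rw [hdiv]; simp only [Int.toNat_natCast]; omega)
      refine ⟨j + 1, d, hd, ?_, ?_⟩
      · rw [hdiv] at hfact
        simp only [Int.toNat_natCast] at hfact
        rw [show (2 : Nat) ^ (j + 1) * d = 2 * (2 ^ j * d) by rw [pow_succ]; ring]
        omega
      · rw [oddPartGo, if_pos hmod]
        exact hval
    · refine ⟨0, s.toNat, ?_, by rw [pow_zero, one_mul], ?_⟩
      · rw [hu, show (2 : Int) = ((2 : Nat) : Int) by norm_num, PySem.Int.mod_natCast] at hmod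
        have : s.toNat % 2 ≠ 0 := by exact_mod_cast fun h => hmod (by exact_mod_cast h)
        omega
      · rw [oddPartGo, if_neg hmod]
        omega

lemma alt_val (a b : Int) (ha : 1 ≤ a) (hb : 1 ≤ b) (hab : a ≠ b) :
    ∃ (j d : Nat), d % 2 = 1 ∧ (a + b).toNat = 2 ^ j * d ∧
      infloop_alt a b = decide (¬ ((d : Int) ∣ a)) := by
  obtain ⟨j, d, hd, hfact, hval⟩ := oddPartGo_spec ((a + b).toNat + 1) (a + b) (by omega) (by omega)
  refine ⟨j, d, hd, hfact, ?_⟩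
  unfold infloop_alt
  rw [if_neg hab, if_neg (by omega : ¬ (a = 0 ∨ b = 0)), hval]
  exact decide_eq_decide.mpr (by rw [Ne, PySem.Int.mod_eq_zero_iff_dvd])

-- ---- bit lemmas for A's power-of-two test ----
lemma land_two_mul_sub_one (w : Nat) (hw : 1 ≤ w) :
    (2 * w) &&& (2 * w - 1) = 2 * (w &&& (w - 1)) := by
  apply Nat.eq_of_testBit_eq
  intro i
  cases i with
  | zero =>
    simp only [Nat.testBit_zero]
    have h1 : 2 * w % 2 = 0 := by omega
    have h2 : 2 * (w &&& (w - 1)) % 2 = 0 := by omega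
    simp [h1, h2]
  | succ i =>
    rw [Nat.testBit_land]
    simp only [Nat.testBit_succ]
    rw [show 2 * w / 2 = w by omega, show (2 * w - 1) / 2 = w - 1 by omega,
      show 2 * (w &&& (w - 1)) / 2 = w &&& (w - 1) by omega, Nat.testBit_land]

lemma land_odd_even (w : Nat) : (2 * w + 1) &&& (2 * w) = 2 * w := by
  apply Nat.eq_of_testBit_eq
  intro i
  cases i with
  | zero =>
    have h1 : 2 * w % 2 = 0 := by omega
    simp [h1]
  | succ i =>
    rw [Nat.testBit_land]
    simp only [Nat.testBit_succ]
    rw [show (2 * w + 1) / 2 = w by omega, show 2 * w / 2 = w by omega, Bool.and_self]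

lemma pow2_of_land (n : Nat) : 0 < n → n &&& (n - 1) = 0 → ∃ k, n = 2 ^ k := by
  induction n using Nat.strong_induction_on with
  | _ n ih =>
    intro hn hl
    rcases Nat.even_or_odd n with he | ho
    · obtain ⟨w, hw⟩ := he
      have hw2 : n = 2 * w := by omega
      have hw1 : 1 ≤ w := by omega
      rw [hw2, land_two_mul_sub_one w hw1] at hl
      obtain ⟨k, hk⟩ := ih w (by omega) (by omega) (by omega)
      exact ⟨k + 1, by rw [pow_succ]; omega⟩
    · obtain ⟨w, hw⟩ := ho
      by_cases h1 : w = 0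
      · exact ⟨0, by omega⟩
      · exfalso
        rw [hw, show 2 * w + 1 - 1 = 2 * w by omega, land_odd_even] at hl
        omega

lemma land_pow2 (k : Nat) : 2 ^ k &&& (2 ^ k - 1) = 0 := by
  induction k with
  | zero => decide
  | succ k ih =>
    rw [pow_succ, show 2 ^ k * 2 = 2 * 2 ^ k by ring,
      land_two_mul_sub_one (2 ^ k) (Nat.one_le_two_pow), ih]

-- d odd and d ∣ u - n ↔ d ∣ n, given d ∣ u and n ≤ u
lemma dvd_sub_iff (d u n : Nat) (hdu : d ∣ u) (hn : n ≤ u) : (d ∣ u - n) ↔ d ∣ n := by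
  constructor <;> intro h
  · have := Nat.dvd_sub hdu h
    rwa [Nat.sub_sub_self hn] at this
  · exact Nat.dvd_sub hdu h

-- A's loop returns True on a state (0, s) (or (s, 0)) with 0 < s
lemma go_step_le (f : Nat) (a b : Int) (mem : List (Int × Int)) (hab : ¬ a = b)
    (hle : ¬ a > b) (hmem : (a, b) ∉ mem) :
    infloopGo (f + 1) a b mem = infloopGo f (a + a) (b - a) (mem ++ [(a, b)]) := by
  simp only [infloopGo, if_neg hab, if_neg hle]
  rw [if_neg hmem]

lemma go_step_gt (f : Nat) (a b : Int) (mem : List (Int × Int)) (hab : ¬ a = b)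
    (hgt : a > b) (hmem : (b, a) ∉ mem) :
    infloopGo (f + 1) a b mem = infloopGo f (b + b) (a - b) (mem ++ [(b, a)]) := by
  simp only [infloopGo, if_neg hab, if_pos hgt]
  rw [if_neg hmem]

lemma go_zero_left (f s : Nat) (hs : 1 ≤ s) : infloopGo (f + 2) 0 (s : Int) [] = true := by
  have h1 : ¬ ((0 : Int) = (s : Int)) := by omega
  have h2 : ¬ ((0 : Int) > (s : Int)) := by omega
  rw [show f + 2 = (f + 1) + 1 from rfl,
    go_step_le (f + 1) 0 (s : Int) [] h1 h2 (by simp),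
    show (0 : Int) + 0 = 0 by ring, show (s : Int) - 0 = (s : Int) by ring,
    List.nil_append]
  simp only [infloopGo, if_neg h1, if_neg h2]
  rw [if_pos (by simp : ((0 : Int), (s : Int)) ∈ [((0 : Int), (s : Int))])]

lemma go_zero_right (f s : Nat) (hs : 1 ≤ s) : infloopGo (f + 2) (s : Int) 0 [] = true := by
  have h1 : ¬ ((s : Int) = (0 : Int)) := by omega
  have h2 : (s : Int) > (0 : Int) := by omega
  have h3 : ¬ ((0 : Int) = (s : Int)) := by omega
  have h4 : ¬ ((0 : Int) > (s : Int)) := by omega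
  rw [show f + 2 = (f + 1) + 1 from rfl,
    go_step_gt (f + 1) (s : Int) 0 [] h1 h2 (by simp),
    show (0 : Int) + 0 = 0 by ring, show (s : Int) - 0 = (s : Int) by ring,
    List.nil_append]
  simp only [infloopGo, if_neg h3, if_neg h4]
  rw [if_pos (by simp : ((0 : Int), (s : Int)) ∈ [((0 : Int), (s : Int))])]

-- ===== VERDICT (by name: the statement is the Claim_ definition above) =====
theorem infloop_spec : Claim_unchanged_infloop := by
  intro a b hdom hpre
  unfold Spec_infloop
  intro hnd
  obtain ⟨ha, hb⟩ := hpre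
  have hdom' : -2147483648 ≤ a ∧ a ≤ 2147483648 ∧ -2147483648 ≤ b ∧ b ≤ 2147483648 := by
    unfold Dom_infloop pvDomInt at hdom
    simp only [Bool.and_eq_true, decide_eq_true_eq] at hdom
    tauto
  by_cases hab : a = b
  · simp [infloop, infloop_alt, hab]
  -- s := a + b ≥ 1
  set u : Nat := (a + b).toNat with hudef
  have hu : a + b = (u : Int) := by omega
  have hu1 : 1 ≤ u := by omega
  unfold infloop
  rw [if_neg hab]
  by_cases hodd : PySem.Int.mod (a + b) 2 = 1
  · -- sum odd: A returns True; so does B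
    rw [if_pos hodd]
    have huodd : u % 2 = 1 := by
      rw [hu, show (2 : Int) = ((2 : Nat) : Int) by norm_num, PySem.Int.mod_natCast] at hodd
      exact_mod_cast hodd
    by_cases hz : a = 0 ∨ b = 0
    · unfold infloop_alt
      rw [if_neg hab, if_pos hz]
    · have ha1 : 1 ≤ a := by omega
      have hb1 : 1 ≤ b := by omega
      obtain ⟨j, d, hd, hfact, hval⟩ := alt_val a b ha1 hb1 hab
      rw [← hudef] at hfact
      rw [hval]
      -- u odd forces j = 0, d = u; and u ∤ a since 0 < a < u
      have hj0 : j = 0 := by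
        cases j with
        | zero => rfl
        | succ j =>
          exfalso
          rw [show (2 : Nat) ^ (j + 1) * d = 2 * (2 ^ j * d) by rw [pow_succ]; ring] at hfact
          omega
      rw [hj0, pow_zero, one_mul] at hfact
      have hnd2 : ¬ ((d : Int) ∣ a) := by
        intro hdvd
        have := Int.le_of_dvd (by omega) hdvd
        omega
      simp [hnd2]
  · rw [if_neg hodd]
    have hueven : u % 2 = 0 := by
      have := PySem.Int.mod_natCast u 2
      rw [← hu] at this
      rw [show (2 : Int) = ((2 : Nat) : Int) by norm_num] at hodd
      omega
    by_cases hband : PySem.Int.band (a + b) (a + b - 1) = 0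
    · -- sum is a power of two: A returns False
      rw [if_pos hband]
      have hland : u &&& (u - 1) = 0 := by
        rw [hu, show (u : Int) - 1 = ((u - 1 : Nat) : Int) by omega,
          PySem.Int.band_natCast] at hband
        exact_mod_cast hband
      obtain ⟨k, hk⟩ := pow2_of_land u (by omega) hland
      have hk1 : 1 ≤ k := by
        cases k with
        | zero => simp at hk; omega
        | succ k => omega
      by_cases hz : a = 0 ∨ b = 0
      · -- this is exactly D_: contradiction with hnd
        exfalso
        apply hnd
        refine ⟨hz, k, ?_, ?_⟩
        · rw [Finset.mem_Icc]
          constructor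
          · exact hk1
          · -- 2^k = u ≤ 2^32 from Dom
            have hub : u ≤ 2 ^ 32 := by
              have : a + b ≤ 2147483648 + 2147483648 := by omega
              omega
            have : (2 : Nat) ^ k ≤ 2 ^ 32 := by omega
            exact (Nat.pow_le_pow_iff_right (by omega)).mp this
        · rw [hu, hk]
          push_cast
          rfl
      · have ha1 : 1 ≤ a := by omega
        have hb1 : 1 ≤ b := by omega
        obtain ⟨j, d, hd, hfact, hval⟩ := alt_val a b ha1 hb1 hab
        rw [← hudef] at hfact
        rw [hval]
        -- d odd divides u = 2^k, so d = 1
        have hdu : d ∣ u := ⟨2 ^ j, by rw [hfact]; ring⟩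
        rw [hk] at hdu
        have hd1 : d = 1 := ((coprime_two_of_odd d hd).pow_right k).eq_one_of_dvd hdu
        simp [hd1]
    · -- main case: the loop actually runs
      rw [if_neg hband]
      rw [show (a + b).toNat + 2 = u + 2 by rw [hudef]]
      by_cases hz : a = 0 ∨ b = 0
      · -- stuck state: loop returns True, B returns True
        have hA : infloopGo (u + 2) a b [] = true := by
          rcases hz with rfl | rfl
          · have hbu : b = (u : Int) := by omega
            rw [hbu]
            exact go_zero_left u u hu1
          · have hau : a = (u : Int) := by omega
            rw [hau]
            exact go_zero_right u u hu1
        rw [hA]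
        unfold infloop_alt
        rw [if_neg hab, if_pos hz]
      · have ha1 : 1 ≤ a := by omega
        have hb1 : 1 ≤ b := by omega
        obtain ⟨j, d, hd, hfact, hval⟩ := alt_val a b ha1 hb1 hab
        rw [← hudef] at hfact
        rw [hval]
        have hmain := go_main u a b (by omega) (by omega) hu
        -- translate the orbit condition through reach_iff and the min
        set x : Nat := (min a b).toNat with hxdef
        obtain ⟨hcast, h2x⟩ := state_min u a b ha hb hu
        have hx0 : 0 < x := by
          rw [hxdef]
          have h3 : (1 : Int) ≤ min a b := le_min ha1 hb1
          omega
        have hreach := reach_iff u x j d hd hfact hx0 (by rw [hxdef]; exact h2x)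
        -- d ∣ x ↔ (d : Int) ∣ a
        have hdu : d ∣ u := ⟨2 ^ j, by rw [hfact]; ring⟩
        have han : a = ((a.toNat : Nat) : Int) := by omega
        have htrans : d ∣ x ↔ (d : Int) ∣ a := by
          rw [han, Int.natCast_dvd_natCast]
          rcases le_total a b with h | h
          · have : min a b = a := min_eq_left h
            rw [hxdef, this, han, Int.toNat_natCast]
          · have hmb : min a b = b := min_eq_right h
            have hxu : x = u - a.toNat := by
              rw [hxdef, hmb]
              omega
            rw [hxu]
            exact dvd_sub_iff d u a.toNat hdu (by omega)
        by_cases hdvd : (d : Int) ∣ a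
        · have hEx : ∃ t, 2 * (2 ^ t * x % u) = u := hreach.mpr (htrans.mpr hdvd)
          rw [hmain.mpr hEx]
          simp [hdvd]
        · have hEx : ¬ ∃ t, 2 * (2 ^ t * x % u) = u :=
            fun h => hdvd (htrans.mp (hreach.mp h))
          have hgt : infloopGo (u + 2) a b [] = true := by
            cases hgo : infloopGo (u + 2) a b []
            · exact absurd (hmain.mp hgo) hEx
            · rfl
          rw [hgt]
          simp [hdvd]

theorem infloop_changed : Claim_changed_infloop := by
  unfold Claim_changed_infloop
  decide

theorem infloop_tight : Claim_exact_infloop := by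
  intro a b hdom hpre hD
  obtain ⟨hz, k, hk, hsum⟩ := hD
  rw [Finset.mem_Icc] at hk
  obtain ⟨ha, hb⟩ := hpre
  have hs2 : (2 : Int) ≤ a + b := by
    rw [hsum]
    calc (2 : Int) = 2 ^ 1 := by norm_num
      _ ≤ 2 ^ k := by
        apply pow_le_pow_right₀ (by norm_num) (by omega)
  have hab : a ≠ b := by
    rcases hz with rfl | rfl <;> omega
  have hA : infloop a b = false := by
    unfold infloop
    rw [if_neg hab]
    have hmod : PySem.Int.mod (a + b) 2 = 0 := by
      rw [hsum, show (2 : Int) ^ k = ((2 ^ k : Nat) : Int) by push_cast; rfl,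
        show (2 : Int) = ((2 : Nat) : Int) by norm_num, PySem.Int.mod_natCast]
      have : (2 : Nat) ^ k % 2 = 0 := by
        have : (2 : Nat) ∣ 2 ^ k := dvd_pow_self 2 (by omega)
        omega
      rw [this]
      rfl
    rw [if_neg (by rw [hmod]; norm_num), if_pos]
    rw [hsum, show (2 : Int) ^ k = ((2 ^ k : Nat) : Int) by push_cast; rfl,
      show ((2 ^ k : Nat) : Int) - 1 = ((2 ^ k - 1 : Nat) : Int) by
        have : (1 : Nat) ≤ 2 ^ k := Nat.one_le_two_pow
        omega,
      PySem.Int.band_natCast, land_pow2]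
    rfl
  have hB : infloop_alt a b = true := by
    unfold infloop_alt
    rw [if_neg hab, if_pos hz]
  rw [hA, hB]
  simp
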